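-- pv_equiv track=rewrite | github.com/ManavdhiMan003/Machine-learning | find_s_algo/find_s.py | get_specific_hypo
-- ===== SOURCE A (Python) =====
-- def get_specific_hypo(att,target):
--     for i, val in enumerate(target):
--         if val == "yes":
--             specific_hypothesis = att[i].copy()
--             break
--
--     for i, val in enumerate(att):
--         if target[i] == "yes":
--             for x in range(len(specific_hypothesis)):
--                 if val[x] != specific_hypothesis[x]:
--                     specific_hypothesis[x] = '?'
--                 else:
--                     pass
--
--     return specific_hypothesis
-- ===== SOURCE B (Python) =====
-- def get_specific_hypo(att, target):
--     positives = [row for row, lab in zip(att, target) if lab == "yes"]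
--     return ['?' if len(set(col)) > 1 else col[0] for col in zip(*positives)]
-- ===== Notes on version B (the rewrite author's own statement) =====
-- stated objective: alternative
-- what changed: Instead of A's stateful hypothesis that each positive row overwrites cell-by-cell, B transposes the positive rows into columns (zip(*positives)) and maps each column to '?' or its value by a set-cardinality test len(set(col))>1 - no reference comparison or mutation at all.
import Mathlib
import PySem

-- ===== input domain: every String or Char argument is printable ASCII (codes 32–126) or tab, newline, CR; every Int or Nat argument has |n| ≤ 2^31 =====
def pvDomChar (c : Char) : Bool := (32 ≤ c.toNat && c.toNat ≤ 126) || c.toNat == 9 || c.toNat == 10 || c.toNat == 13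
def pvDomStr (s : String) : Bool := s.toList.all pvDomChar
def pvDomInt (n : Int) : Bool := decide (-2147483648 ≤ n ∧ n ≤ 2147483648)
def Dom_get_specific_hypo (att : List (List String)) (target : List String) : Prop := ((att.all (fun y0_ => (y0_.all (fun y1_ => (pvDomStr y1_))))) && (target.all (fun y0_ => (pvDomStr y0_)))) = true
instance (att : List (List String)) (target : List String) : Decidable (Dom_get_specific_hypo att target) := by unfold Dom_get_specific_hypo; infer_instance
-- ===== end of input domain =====

-- B replaces A's stateful cell-overwrite hypothesis by a transpose-and-set pass: zip/filter the
-- positive rows, transpose them into columns, and map each column to '?' or its value by a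
-- set-cardinality test; same cost, genuinely different data layout (column lists + sets, no mutation).


-- ===== PORT A =====
-- first loop: scan enumerate(target) for the first "yes", take att[i] (none = IndexError/UnboundLocalError)
def ghA_first (att : List (List String)) : List (Int × String) → Option (List String)
  | [] => none
  | (i, val) :: rest =>
      if val == "yes" then PySem.List.pyGet? att i else ghA_first att rest

-- inner loop: for x in range(len(hyp)): if val[x] != hyp[x]: hyp[x] = '?'
-- (x comes from range(len(hyp)) so it is nonnegative: .toNat is exact here)
def ghA_row (val h : List String) : List String :=
  (PySem.List.pyRange 0 (h.length : Int) 1).foldl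
    (fun h2 x =>
      if PySem.List.pyGetD val x "" ≠ PySem.List.pyGetD h2 x "" then h2.set x.toNat "?" else h2) h

def get_specific_hypo (att : List (List String)) (target : List String) : List String :=
  match ghA_first att (PySem.List.enumerate target) with
  | none => []   -- Python raises here (no positive example / index error); excluded by Pre_
  | some hyp0 =>
      (PySem.List.enumerate att).foldl
        (fun h p => if PySem.List.pyGetD target p.1 "" == "yes" then ghA_row p.2 h else h) hyp0

-- ===== PORT B =====
-- zip(*rows): columns 0 .. min(len(row))-1; getD is exact because j < every row's length
def ghB_zipStar (rows : List (List String)) : List (List String) :=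
  match (rows.map List.length).min? with
  | none => []
  | some m => (List.range m).map (fun j => rows.map (fun p => p.getD j ""))

def get_specific_hypo_alt (att : List (List String)) (target : List String) : List String :=
  let positives := ((att.zip target).filter (fun p => p.2 == "yes")).map Prod.fst
  (ghB_zipStar positives).map
    (fun col => if 1 < (PySem.Set.ofList col).length then "?" else col.headD "")

-- ===== PRECONDITION & SPEC =====
-- exactly the inputs on which the Python A returns: some "yes" occurs in target at an index < len(att),
-- att is no longer than target, and every positive row is at least as long as the reference row
def Pre_get_specific_hypo (att : List (List String)) (target : List String) : Prop :=
  att.length ≤ target.length ∧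
  target.findIdx (· == "yes") < att.length ∧
  ∀ i < att.length, target.getD i "" = "yes" →
    (att.getD (target.findIdx (· == "yes")) []).length ≤ (att.getD i []).length
instance (att : List (List String)) (target : List String) : Decidable (Pre_get_specific_hypo att target) := by
  unfold Pre_get_specific_hypo; infer_instance

def pvWitness_get_specific_hypo : List (List String) × List String :=
  ([["sunny", "warm"], ["rainy", "warm"]], ["yes", "yes"])

def Spec_get_specific_hypo (att : List (List String)) (target : List String) (out : List String) : Prop := out = get_specific_hypo_alt att target
instance (att : List (List String)) (target : List String) (out : List String) : Decidable (Spec_get_specific_hypo att target out) := by unfold Spec_get_specific_hypo; infer_instance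

-- ===== CLAIM (what is proved, stated in full; the proofs are below) =====
def Claim_equal_get_specific_hypo : Prop := ∀ (att : List (List String)) (target : List String), Dom_get_specific_hypo att target → Pre_get_specific_hypo att target → Spec_get_specific_hypo att target (get_specific_hypo att target)

-- ===== LEMMAS AND PROOFS =====

-- A's inner loop, restated over Nat indices
def ghRowNat (val h : List String) : List String :=
  (List.range h.length).foldl
    (fun h2 x => if val.getD x "" ≠ h2.getD x "" then h2.set x "?" else h2) h

theorem ghA_row_eq_nat (val h : List String) : ghA_row val h = ghRowNat val h := by
  unfold ghA_row ghRowNat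
  rw [PySem.List.pyRange_zero_natCast, List.foldl_map]
  simp [PySem.List.pyGetD_natCast]

-- core of the inner loop: length preserved, pointwise value
theorem rowCore (val : List String) : ∀ (n : Nat) (h : List String), n ≤ h.length →
    ((List.range n).foldl (fun h2 x => if val.getD x "" ≠ h2.getD x "" then h2.set x "?" else h2) h).length = h.length ∧
    ∀ x : Nat, ((List.range n).foldl (fun h2 x => if val.getD x "" ≠ h2.getD x "" then h2.set x "?" else h2) h).getD x "" =
      if x < n ∧ val.getD x "" ≠ h.getD x "" then "?" else h.getD x "" := by
  intro n
  induction n with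
  | zero => intro h _; simp
  | succ n ih =>
    intro h hn
    obtain ⟨hlen, hpt⟩ := ih h (by omega)
    rw [List.range_succ, List.foldl_append, List.foldl_cons, List.foldl_nil]
    have hgn : ((List.range n).foldl (fun h2 x => if val.getD x "" ≠ h2.getD x "" then h2.set x "?" else h2) h).getD n "" = h.getD n "" := by
      rw [hpt n]; simp
    rw [hgn]
    by_cases hne : val.getD n "" ≠ h.getD n ""
    · rw [if_pos hne]
      refine ⟨by rw [List.length_set, hlen], ?_⟩
      intro x
      rw [List.getD_eq_getElem?_getD, List.getElem?_set, hlen]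
      by_cases hxn : n = x
      · subst hxn
        rw [if_pos rfl, if_pos (by omega)]
        rw [if_pos ⟨by omega, hne⟩]
        rfl
      · rw [if_neg hxn, ← List.getD_eq_getElem?_getD, hpt x]
        by_cases hx : x < n
        · by_cases hvx : val.getD x "" ≠ h.getD x ""
          · rw [if_pos ⟨hx, hvx⟩, if_pos ⟨by omega, hvx⟩]
          · rw [if_neg (fun hc => hvx hc.2), if_neg (fun hc => hvx hc.2)]
        · rw [if_neg (fun hc => hx hc.1), if_neg (fun hc => absurd hc.1 (by omega))]
    · rw [if_neg hne]
      push Not at hne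
      refine ⟨hlen, ?_⟩
      intro x
      rw [hpt x]
      by_cases hxn : x = n
      · subst hxn
        rw [if_neg (fun hc => hc.2 hne), if_neg (fun hc => hc.2 hne)]
      · by_cases hx : x < n
        · by_cases hvx : val.getD x "" ≠ h.getD x ""
          · rw [if_pos ⟨hx, hvx⟩, if_pos ⟨by omega, hvx⟩]
          · rw [if_neg (fun hc => hvx hc.2), if_neg (fun hc => hvx hc.2)]
        · rw [if_neg (fun hc => hx hc.1), if_neg (fun hc => absurd hc.1 (by omega))]

theorem ghRowNat_length (val h : List String) : (ghRowNat val h).length = h.length := by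
  exact (rowCore val h.length h le_rfl).1

theorem ghRowNat_getD (val h : List String) (x : Nat) :
    (ghRowNat val h).getD x "" =
      if x < h.length ∧ val.getD x "" ≠ h.getD x "" then "?" else h.getD x "" := by
  exact (rowCore val h.length h le_rfl).2 x

-- the fold of A's row updates over a list of rows, pointwise
theorem fold_rows (rows : List (List String)) :
    ∀ (h : List String),
    (rows.foldl (fun h v => ghA_row v h) h).length = h.length ∧
    ∀ x < h.length, (rows.foldl (fun h v => ghA_row v h) h).getD x "" =
      if ∀ p ∈ rows, p.getD x "" = h.getD x "" then h.getD x "" else "?" := by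
  induction rows with
  | nil => intro h; simp
  | cons v rs ih =>
    intro h
    simp only [List.foldl_cons]
    obtain ⟨hl, hp⟩ := ih (ghA_row v h)
    have hrl : (ghA_row v h).length = h.length := by
      rw [ghA_row_eq_nat]; exact ghRowNat_length v h
    refine ⟨by rw [hl, hrl], ?_⟩
    intro x hx
    rw [hp x (by rw [hrl]; exact hx)]
    by_cases hvx : v.getD x "" = h.getD x ""
    · have hveq : (ghA_row v h).getD x "" = h.getD x "" := by
        rw [ghA_row_eq_nat, ghRowNat_getD]
        rw [if_neg (by tauto)]
      rw [hveq]
      simp only [List.forall_mem_cons, hvx, true_and]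
    · have hveq : (ghA_row v h).getD x "" = "?" := by
        rw [ghA_row_eq_nat, ghRowNat_getD]
        rw [if_pos ⟨hx, hvx⟩]
      rw [hveq]
      simp only [List.forall_mem_cons, hvx, false_and, if_false]
      split <;> rfl

-- A's first loop finds att[first yes index]
theorem ghA_first_eq (att : List (List String)) :
    ∀ (tl : List String) (s : Nat),
      ghA_first att (PySem.List.enumerate tl (s : Int)) =
        if tl.findIdx (· == "yes") < tl.length then
          PySem.List.pyGet? att ((s + tl.findIdx (· == "yes") : Nat) : Int)
        else none := by
  intro tl
  induction tl with
  | nil => intro s; simp [PySem.List.enumerate_nil, ghA_first]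
  | cons t ts ih =>
    intro s
    rw [PySem.List.enumerate_cons]
    show (if t == "yes" then PySem.List.pyGet? att (s : Int) else ghA_first att (PySem.List.enumerate ts ((s : Int) + 1))) = _
    by_cases hy : t == "yes"
    · rw [if_pos hy, List.findIdx_cons, hy]
      simp
    · have hy' : (t == "yes") = false := by simpa using hy
      rw [if_neg hy, List.findIdx_cons, hy']
      have : ((s : Int) + 1) = ((s + 1 : Nat) : Int) := by push_cast; ring
      rw [this, ih (s + 1)]
      simp only [cond_false, List.length_cons]
      by_cases hf : ts.findIdx (· == "yes") < ts.length
      · rw [if_pos hf, if_pos (by omega)]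
        congr 1
        push_cast
        ring
      · rw [if_neg hf, if_neg (by omega)]

-- A's second loop = fold of the row update over the positive rows
theorem ghA_outer_eq (tgt : List String) :
    ∀ (al : List (List String)) (s : Nat) (h : List String), s + al.length ≤ tgt.length →
      (PySem.List.enumerate al (s : Int)).foldl
          (fun h p => if PySem.List.pyGetD tgt p.1 "" == "yes" then ghA_row p.2 h else h) h =
        (((al.zip (tgt.drop s)).filter (fun p => p.2 == "yes")).map Prod.fst).foldl
          (fun h v => ghA_row v h) h := by
  intro al
  induction al with
  | nil => intro s h _; simp [PySem.List.enumerate_nil]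
  | cons a as ih =>
    intro s h hle
    have hs : s < tgt.length := by simp at hle; omega
    rw [PySem.List.enumerate_cons, List.drop_eq_getElem_cons hs]
    rw [List.foldl_cons, List.zip_cons_cons, List.filter_cons]
    have hguard : PySem.List.pyGetD tgt ((s : Int)) "" = tgt[s] := by
      rw [PySem.List.pyGetD_natCast, List.getD_eq_getElem tgt "" hs]
    have hcast : ((s : Int) + 1) = ((s + 1 : Nat) : Int) := by push_cast; ring
    by_cases hy : tgt[s] == "yes"
    · rw [if_pos (by rw [hguard]; exact hy)]
      rw [hcast, ih (s + 1) (ghA_row a h) (by simp at hle ⊢; omega)]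
      simp [hy]
    · rw [if_neg (by rw [hguard]; simpa using hy)]
      rw [hcast, ih (s + 1) h (by simp at hle ⊢; omega)]
      simp [hy]

-- the positives list starts with att[first yes index]
theorem positives_head :
    ∀ (al : List (List String)) (tl : List String),
      tl.findIdx (· == "yes") < al.length → al.length ≤ tl.length →
      ∃ rest, ((al.zip tl).filter (fun p => p.2 == "yes")).map Prod.fst =
        al.getD (tl.findIdx (· == "yes")) [] :: rest := by
  intro al
  induction al with
  | nil => intro tl h _; simp at h
  | cons a as ih =>
    intro tl hj hlen
    match tl with
    | [] => simp at hlen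
    | t :: ts =>
      rw [List.zip_cons_cons, List.filter_cons]
      by_cases hy : t == "yes"
      · rw [List.findIdx_cons, hy]
        simp only [cond_true]
        exact ⟨_, rfl⟩
      · have hy' : (t == "yes") = false := by simpa using hy
        rw [List.findIdx_cons, hy'] at hj ⊢
        simp only [cond_false] at hj ⊢
        have := ih ts (by simpa using Nat.lt_of_succ_lt_succ (by simpa using hj)) (by simpa using hlen)
        obtain ⟨rest, hrest⟩ := this
        exact ⟨rest, by simpa using hrest⟩

-- every element of the positives list is att[i] for some positive index i
theorem positives_mem :
    ∀ (al : List (List String)) (tl : List String) (p : List String),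
      p ∈ ((al.zip tl).filter (fun q => q.2 == "yes")).map Prod.fst →
      ∃ i, i < al.length ∧ tl.getD i "" = "yes" ∧ p = al.getD i [] := by
  intro al
  induction al with
  | nil => intro tl p hp; simp at hp
  | cons a as ih =>
    intro tl p hp
    match tl with
    | [] => simp at hp
    | t :: ts =>
      rw [List.zip_cons_cons, List.filter_cons] at hp
      by_cases hy : t == "yes"
      · rw [if_pos hy] at hp
        rcases (by simpa using hp : p = a ∨ p ∈ ((as.zip ts).filter (fun q => q.2 == "yes")).map Prod.fst) with h | h
        · exact ⟨0, by simp, by simpa using hy, by simpa using h⟩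
        · obtain ⟨i, hi, hyi, hpi⟩ := ih ts p h
          exact ⟨i + 1, by simpa using hi, by simpa using hyi, by simpa using hpi⟩
      · rw [if_neg hy] at hp
        obtain ⟨i, hi, hyi, hpi⟩ := ih ts p hp
        exact ⟨i + 1, by simpa using hi, by simpa using hyi, by simpa using hpi⟩

-- min? of a nonempty list of lower-bounded values
theorem foldl_min_eq (a : Nat) : ∀ (l : List Nat), (∀ x ∈ l, a ≤ x) → l.foldl min a = a := by
  intro l
  induction l generalizing a with
  | nil => intro _; rfl
  | cons b bs ih =>
    intro hb
    rw [List.foldl_cons, Nat.min_eq_left (hb b (by simp))]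
    exact ih a (fun x hx => hb x (by simp [hx]))

-- set(a :: l) has more than one element iff some element of l differs from a
theorem ofList_all_eq (a : String) : ∀ (l : List String), (∀ v ∈ l, v = a) →
    PySem.Set.ofList (a :: l) = [a] := by
  have step : ∀ (l : List String), (∀ v ∈ l, v = a) → l.foldl PySem.Set.add [a] = [a] := by
    intro l
    induction l with
    | nil => intro _; rfl
    | cons b bs ih =>
      intro hb
      rw [List.foldl_cons, hb b (by simp)]
      have : PySem.Set.add [a] a = [a] := by simp [PySem.Set.add, PySem.Set.contains]
      rw [this]
      exact ih (fun v hv => hb v (by simp [hv]))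
  intro l hl
  rw [PySem.Set.ofList_eq_foldl, List.foldl_cons]
  show List.foldl PySem.Set.add [a] l = [a]
  exact step l hl

theorem setlen_gt_one (a : String) (l : List String) :
    (1 < (PySem.Set.ofList (a :: l)).length) ↔ ∃ v ∈ l, v ≠ a := by
  constructor
  · intro h
    by_contra hc
    push Not at hc
    rw [ofList_all_eq a l hc] at h
    simp at h
  · rintro ⟨v, hv, hva⟩
    have hmem_a : a ∈ PySem.Set.ofList (a :: l) := by rw [PySem.Set.mem_ofList]; simp
    have hmem_v : v ∈ PySem.Set.ofList (a :: l) := by rw [PySem.Set.mem_ofList]; simp [hv]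
    match hs : PySem.Set.ofList (a :: l) with
    | [] => rw [hs] at hmem_a; simp at hmem_a
    | [x] =>
      rw [hs] at hmem_a hmem_v
      simp at hmem_a hmem_v
      exact absurd (hmem_v.trans hmem_a.symm) hva
    | x :: y :: t => simp

-- ===== VERDICT (by name: the statement is the Claim_ definition above) =====
theorem get_specific_hypo_spec : Claim_equal_get_specific_hypo := by
  intro att target _ hpre
  obtain ⟨hlen, hj, hmin⟩ := hpre
  unfold Spec_get_specific_hypo
  set j := target.findIdx (· == "yes") with hjdef
  have hjt : j < target.length := lt_of_lt_of_le hj hlen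
  set ref : List String := att.getD j [] with hrefdef
  -- A's first loop yields the reference positive row
  have h1 : ghA_first att (PySem.List.enumerate target) = some ref := by
    have h := ghA_first_eq att target 0
    rw [Nat.cast_zero] at h
    rw [h, if_pos hjt, Nat.zero_add, PySem.List.pyGet?_natCast]
    rw [List.getElem?_eq_getElem hj, hrefdef, List.getD_eq_getElem att [] hj]
  -- the positives list
  obtain ⟨rest, hpos⟩ := positives_head att target hj hlen
  rw [← hjdef, ← hrefdef] at hpos
  -- every positive row is at least as long as ref
  have hrowlen : ∀ p ∈ rest, ref.length ≤ p.length := by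
    intro p hp
    obtain ⟨i, hi, hyi, hpi⟩ := positives_mem att target p (by rw [hpos]; simp [hp])
    rw [hpi]
    exact hmin i hi hyi
  -- reduce A
  have hA : get_specific_hypo att target = (ref :: rest).foldl (fun h v => ghA_row v h) ref := by
    unfold get_specific_hypo
    rw [h1]
    show (PySem.List.enumerate att 0).foldl
        (fun h p => if PySem.List.pyGetD target p.1 "" == "yes" then ghA_row p.2 h else h) ref = _
    have houter := ghA_outer_eq target att 0 ref (by omega)
    rw [Nat.cast_zero] at houter
    rw [houter, List.drop_zero, hpos]
  -- reduce B: the minimum row length is ref's, so zip(*positives) has ref.length columns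
  have hminlen : (((ref :: rest).map List.length).min?) = some ref.length := by
    rw [List.map_cons, List.min?_cons']
    congr 1
    exact foldl_min_eq ref.length (rest.map List.length)
      (by intro x hx; obtain ⟨p, hp, hxp⟩ := List.mem_map.mp hx; rw [← hxp]; exact hrowlen p hp)
  have hB : get_specific_hypo_alt att target =
      (List.range ref.length).map (fun x =>
        if 1 < (PySem.Set.ofList ((ref :: rest).map (fun p => p.getD x ""))).length then "?"
        else ((ref :: rest).map (fun p => p.getD x "")).headD "") := by
    simp only [get_specific_hypo_alt, hpos, ghB_zipStar, hminlen, List.map_map]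
    rfl
  rw [hA, hB]
  obtain ⟨hAlen, hApt⟩ := fold_rows (ref :: rest) ref
  apply List.ext_getElem
  · rw [hAlen, List.length_map, List.length_range]
  · intro x hx1 hx2
    have hxr : x < ref.length := by rwa [hAlen] at hx1
    have hgetA : ((ref :: rest).foldl (fun h v => ghA_row v h) ref)[x] =
        ((ref :: rest).foldl (fun h v => ghA_row v h) ref).getD x "" := by
      rw [List.getD_eq_getElem _ "" hx1]
    rw [hgetA, hApt x hxr]
    rw [List.getElem_map, List.getElem_range]
    rw [List.map_cons]
    simp only [setlen_gt_one (ref.getD x "") (rest.map (fun p => p.getD x ""))]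
    by_cases hall : ∀ p ∈ (ref :: rest), p.getD x "" = ref.getD x ""
    · rw [if_pos hall, if_neg]
      · rfl
      · rintro ⟨v, hv, hvne⟩
        obtain ⟨p, hp, hvp⟩ := List.mem_map.mp hv
        exact hvne (hvp ▸ hall p (by simp [hp]))
    · rw [if_neg hall, if_pos]
      push Not at hall
      obtain ⟨p, hp, hne⟩ := hall
      rcases (by simpa using hp : p = ref ∨ p ∈ rest) with h | h
      · exact absurd (h ▸ rfl) hne
      · exact ⟨p.getD x "", List.mem_map.mpr ⟨p, h, rfl⟩, hne⟩
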